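-- pv_equiv track=rewrite | github.com/zafrem/pii-pattern-engine | verification/python/verification.py | sweden_personnummer_valid
-- ===== SOURCE A (Python) =====
-- def luhn(value: str) -> bool:
--     """
--     Verify using Luhn algorithm (mod-10 checksum).
--
--     Used for credit cards, some national IDs, etc.
--
--     Args:
--         value: Numeric string to verify
--
--     Returns:
--         True if passes Luhn check, False otherwise
--     """
--     # Remove non-digits
--     digits = [int(d) for d in value if d.isdigit()]
--
--     if not digits:
--         return False
--
--     # Luhn algorithm
--     checksum = 0
--     reverse_digits = digits[::-1]
--
--     for i, digit in enumerate(reverse_digits):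
--         if i % 2 == 1:  # Every second digit from right
--             digit *= 2
--             if digit > 9:
--                 digit -= 9
--         checksum += digit
--
--     return checksum % 10 == 0
--
-- def sweden_personnummer_valid(value: str) -> bool:
--     """
--     Verify Swedish Personnummer using Luhn algorithm.
--
--     Format: YYYYMMDD-XXXX or YYMMDD-XXXX (10 or 12 digits)
--     The last 4 digits include a Luhn check digit.
--
--     For Luhn, only the last 10 digits (YYMMDDXXXX) are used.
--
--     Args:
--         value: Personnummer string
--
--     Returns:
--         True if valid Luhn checksum, False otherwise
--     """
--     # Remove separators
--     digits = "".join(c for c in value if c.isdigit())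
--
--     if len(digits) == 12:
--         # Full format YYYYMMDDXXXX - use last 10 digits
--         digits = digits[2:]
--     elif len(digits) != 10:
--         return False
--
--     # Parse and validate date
--     try:
--         mm = int(digits[2:4])
--         dd = int(digits[4:6])
--     except ValueError:
--         return False
--
--     # Basic date validation (assume 1900s or 2000s)
--     if mm < 1 or mm > 12:
--         return False
--     if dd < 1 or dd > 31:
--         return False
--
--     # Luhn algorithm on all 10 digits
--     return luhn(digits)
-- ===== SOURCE B (Python) =====
-- # Check-digit formulation of the Luhn test: double the even positions via a
-- # precomputed lookup table and compare the last digit with the computed check digit.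
-- _DOUBLE = (0, 2, 4, 6, 8, 1, 3, 5, 7, 9)
--
-- def sweden_personnummer_valid(value: str) -> bool:
--     ds = [int(c) for c in value if c.isdigit()]
--     if len(ds) not in (10, 12):
--         return False
--     ds = ds[-10:]
--     if not (1 <= ds[2] * 10 + ds[3] <= 12 and 1 <= ds[4] * 10 + ds[5] <= 31):
--         return False
--     partial = sum(_DOUBLE[d] for d in ds[0:9:2]) + sum(ds[1:9:2])
--     return ds[9] == -partial % 10
-- ===== Notes on version B (the rewrite author's own statement) =====
-- stated objective: alternative
-- what changed: B drops the luhn() helper entirely and replaces the reverse-and-branch-on-parity checksum loop by the check-digit formulation: it maps digits through a precomputed doubling table on the even positions of ds[0:9:2], sums the odd positions ds[1:9:2], and compares the last digit with the computed check digit -partial % 10; the 12-digit trim becomes a uniform ds[-10:] after a length-in-(10,12) test and mm/dd are read by direct indexing instead of int() on slices.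
import Mathlib
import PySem

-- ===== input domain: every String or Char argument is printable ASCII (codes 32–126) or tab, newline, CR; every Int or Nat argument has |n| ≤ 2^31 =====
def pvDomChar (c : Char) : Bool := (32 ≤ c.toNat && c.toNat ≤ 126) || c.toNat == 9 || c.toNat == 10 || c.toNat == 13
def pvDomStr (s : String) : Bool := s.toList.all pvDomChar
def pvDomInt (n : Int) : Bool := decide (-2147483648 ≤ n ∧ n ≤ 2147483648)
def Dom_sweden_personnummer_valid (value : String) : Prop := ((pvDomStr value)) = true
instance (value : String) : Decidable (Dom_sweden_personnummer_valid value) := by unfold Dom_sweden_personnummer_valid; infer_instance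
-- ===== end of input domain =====

-- B drops A's reverse-and-double Luhn loop and luhn() helper for the check-digit formulation:
-- a doubling lookup table over the strided even positions ds[0:9:2] plus the odd positions ds[1:9:2],
-- comparing ds[9] with -partial % 10 (alternative decomposition, same cost).

-- ===== PORT A =====
-- Port of the module helper `luhn` (int(d) on a filtered digit char ported totally via ofChars?/getD).
def luhn (value : String) : Bool :=
  let digits : List Int := (value.toList.filter PySem.Chars.isdigit).map
      (fun d => (PySem.Int.ofChars? [d]).getD 0)
  if digits.isEmpty then false
  else
    let reverse_digits := digits.reverse
    let checksum := (PySem.List.enumerate reverse_digits 0).foldl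
      (fun checksum p =>
        let digit := if PySem.Int.mod p.1 2 = 1 then
            (let d2 := p.2 * 2; if d2 > 9 then d2 - 9 else d2)
          else p.2
        checksum + digit) 0
    decide (PySem.Int.mod checksum 10 = 0)

-- the tail of A after the length dispatch (int(..) may raise ValueError -> the `| _, _ => false` arm)
def pvRestA (digits : List Char) : Bool :=
  match PySem.Int.ofChars? (PySem.List.slice digits (some 2) (some 4)),
        PySem.Int.ofChars? (PySem.List.slice digits (some 4) (some 6)) with
  | some mm, some dd =>
      if mm < 1 ∨ mm > 12 then false
      else if dd < 1 ∨ dd > 31 then false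
      else luhn (String.ofList digits)
  | _, _ => false

def sweden_personnummer_valid (value : String) : Bool :=
  let digits := value.toList.filter PySem.Chars.isdigit
  if digits.length = 12 then pvRestA (PySem.List.slice digits (some 2) none)
  else if digits.length ≠ 10 then false
  else pvRestA digits

-- ===== PORT B =====
-- _DOUBLE = (0, 2, 4, 6, 8, 1, 3, 5, 7, 9)
def pvDouble : List Int := [0, 2, 4, 6, 8, 1, 3, 5, 7, 9]

-- the body of B from `ds = ds[-10:]` on (ds has length 10 or 12 here); indexing via pyGet?/getD is
-- exact: every index is in range and every table index is a digit value 0..9.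
def pvTailB (ds0 : List Int) : Bool :=
  let ds := PySem.List.slice ds0 (some (-10)) none   -- ds[-10:]
  let g : Int → Int := fun i => (PySem.List.pyGet? ds i).getD 0
  if ¬ (1 ≤ g 2 * 10 + g 3 ∧ g 2 * 10 + g 3 ≤ 12 ∧ 1 ≤ g 4 * 10 + g 5 ∧ g 4 * 10 + g 5 ≤ 31)
  then false
  else
    let part :=
      (((PySem.List.slice? ds (some 0) (some 9) 2).getD []).map
          (fun d => (PySem.List.pyGet? pvDouble d).getD 0)).sum
        + ((PySem.List.slice? ds (some 1) (some 9) 2).getD []).sum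
    decide (g 9 = PySem.Int.mod (-part) 10)

def sweden_personnummer_valid_alt (value : String) : Bool :=
  let ds : List Int := (value.toList.filter PySem.Chars.isdigit).map
      (fun c => (PySem.Int.ofChars? [c]).getD 0)   -- int(c), c a digit char so never none
  if ¬ (ds.length = 10 ∨ ds.length = 12) then false
  else pvTailB ds

-- ===== PRECONDITION & SPEC =====
def Spec_sweden_personnummer_valid (value : String) (out : Bool) : Prop := out = sweden_personnummer_valid_alt value
instance (value : String) (out : Bool) : Decidable (Spec_sweden_personnummer_valid value out) := by unfold Spec_sweden_personnummer_valid; infer_instance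

-- ===== CLAIM (what is proved, stated in full; the proofs are below) =====
def Claim_equal_sweden_personnummer_valid : Prop := ∀ (value : String), Dom_sweden_personnummer_valid value → Spec_sweden_personnummer_valid value (sweden_personnummer_valid value)

-- ===== LEMMAS AND PROOFS =====

theorem digit_cases (c : Char) (h : PySem.Chars.isdigit c = true) :
    c = '0' ∨ c = '1' ∨ c = '2' ∨ c = '3' ∨ c = '4' ∨ c = '5' ∨ c = '6' ∨ c = '7' ∨ c = '8' ∨ c = '9' := by
  simp only [PySem.Chars.isdigit, Bool.and_eq_true, decide_eq_true_eq, Char.le_def] at h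
  have h1 : 48 ≤ c.toNat := UInt32.le_iff_toNat_le.mp h.1
  have h2 : c.toNat ≤ 57 := UInt32.le_iff_toNat_le.mp h.2
  interval_cases hn : c.toNat <;> (rw [← Char.ofNat_toNat c, hn]; decide)

theorem ofChars?_digit (c : Char) (h : PySem.Chars.isdigit c = true) :
    PySem.Int.ofChars? [c] = some ((c.toNat : Int) - 48) := by
  rcases digit_cases c h with rfl|rfl|rfl|rfl|rfl|rfl|rfl|rfl|rfl|rfl <;> decide

theorem ofChars?_digit2 (c d : Char) (hc : PySem.Chars.isdigit c = true)
    (hd : PySem.Chars.isdigit d = true) :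
    PySem.Int.ofChars? [c, d] = some (10 * ((c.toNat : Int) - 48) + ((d.toNat : Int) - 48)) := by
  rcases digit_cases c hc with rfl|rfl|rfl|rfl|rfl|rfl|rfl|rfl|rfl|rfl <;>
    rcases digit_cases d hd with rfl|rfl|rfl|rfl|rfl|rfl|rfl|rfl|rfl|rfl <;> decide

theorem digit_bounds (c : Char) (h : PySem.Chars.isdigit c = true) :
    0 ≤ (c.toNat : Int) - 48 ∧ (c.toNat : Int) - 48 ≤ 9 := by
  rcases digit_cases c h with rfl|rfl|rfl|rfl|rfl|rfl|rfl|rfl|rfl|rfl <;> decide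

theorem table_eq (x : Int) (h0 : 0 ≤ x) (h9 : x ≤ 9) :
    (PySem.List.pyGet? pvDouble x).getD 0 = (if x * 2 > 9 then x * 2 - 9 else x * 2) := by
  interval_cases x <;> decide

set_option maxRecDepth 8192 in
set_option maxHeartbeats 1000000 in
theorem tailB_eval (x0 x1 x2 x3 x4 x5 x6 x7 x8 x9 : Int) :
    pvTailB [x0,x1,x2,x3,x4,x5,x6,x7,x8,x9] =
      (if ¬ (1 ≤ x2 * 10 + x3 ∧ x2 * 10 + x3 ≤ 12 ∧ 1 ≤ x4 * 10 + x5 ∧ x4 * 10 + x5 ≤ 31)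
       then false
       else
         decide (x9 = PySem.Int.mod
           (-(((PySem.List.pyGet? pvDouble x0).getD 0 + ((PySem.List.pyGet? pvDouble x2).getD 0 +
               ((PySem.List.pyGet? pvDouble x4).getD 0 + ((PySem.List.pyGet? pvDouble x6).getD 0 +
               ((PySem.List.pyGet? pvDouble x8).getD 0 + 0)))))
             + (x1 + (x3 + (x5 + (x7 + 0)))))) 10)) := rfl

set_option maxRecDepth 8192 in
theorem core10 (c0 c1 c2 c3 c4 c5 c6 c7 c8 c9 : Char)
    (h : ∀ c ∈ [c0,c1,c2,c3,c4,c5,c6,c7,c8,c9], PySem.Chars.isdigit c = true) :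
    pvRestA [c0,c1,c2,c3,c4,c5,c6,c7,c8,c9] =
      pvTailB ([c0,c1,c2,c3,c4,c5,c6,c7,c8,c9].map (fun c => (PySem.Int.ofChars? [c]).getD 0)) := by
  have h0 : PySem.Chars.isdigit c0 = true := h _ (by simp)
  have h1 : PySem.Chars.isdigit c1 = true := h _ (by simp)
  have h2 : PySem.Chars.isdigit c2 = true := h _ (by simp)
  have h3 : PySem.Chars.isdigit c3 = true := h _ (by simp)
  have h4 : PySem.Chars.isdigit c4 = true := h _ (by simp)
  have h5 : PySem.Chars.isdigit c5 = true := h _ (by simp)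
  have h6 : PySem.Chars.isdigit c6 = true := h _ (by simp)
  have h7 : PySem.Chars.isdigit c7 = true := h _ (by simp)
  have h8 : PySem.Chars.isdigit c8 = true := h _ (by simp)
  have h9 : PySem.Chars.isdigit c9 = true := h _ (by simp)
  have b0 := digit_bounds c0 h0
  have b1 := digit_bounds c1 h1
  have b2 := digit_bounds c2 h2
  have b3 := digit_bounds c3 h3
  have b4 := digit_bounds c4 h4
  have b5 := digit_bounds c5 h5
  have b6 := digit_bounds c6 h6
  have b7 := digit_bounds c7 h7
  have b8 := digit_bounds c8 h8
  have b9 := digit_bounds c9 h9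
  simp only [List.map_cons, List.map_nil, ofChars?_digit c0 h0, ofChars?_digit c1 h1,
    ofChars?_digit c2 h2, ofChars?_digit c3 h3, ofChars?_digit c4 h4, ofChars?_digit c5 h5,
    ofChars?_digit c6 h6, ofChars?_digit c7 h7, ofChars?_digit c8 h8, ofChars?_digit c9 h9,
    Option.getD_some]
  rw [tailB_eval]
  rw [table_eq _ b0.1 b0.2, table_eq _ b2.1 b2.2, table_eq _ b4.1 b4.2,
      table_eq _ b6.1 b6.2, table_eq _ b8.1 b8.2]
  simp only [pvRestA]
  rw [show PySem.List.slice [c0,c1,c2,c3,c4,c5,c6,c7,c8,c9] (some 2) (some 4) = [c2,c3] from rfl,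
      show PySem.List.slice [c0,c1,c2,c3,c4,c5,c6,c7,c8,c9] (some 4) (some 6) = [c4,c5] from rfl,
      ofChars?_digit2 c2 c3 h2 h3, ofChars?_digit2 c4 c5 h4 h5]
  norm_num [luhn, h0, h1, h2, h3, h4, h5, h6, h7, h8, h9,
    ofChars?_digit c0 h0, ofChars?_digit c1 h1, ofChars?_digit c2 h2, ofChars?_digit c3 h3,
    ofChars?_digit c4 h4, ofChars?_digit c5 h5, ofChars?_digit c6 h6, ofChars?_digit c7 h7,
    ofChars?_digit c8 h8, ofChars?_digit c9 h9, PySem.List.enumerate_cons, PySem.List.enumerate_nil,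
    List.foldl, PySem.Int.mod]
  norm_num [(by decide : Int.fmod 1 2 = 1), (by decide : Int.fmod 2 2 = 0),
    (by decide : Int.fmod 3 2 = 1), (by decide : Int.fmod 4 2 = 0), (by decide : Int.fmod 5 2 = 1),
    (by decide : Int.fmod 6 2 = 0), (by decide : Int.fmod 7 2 = 1), (by decide : Int.fmod 8 2 = 0),
    (by decide : Int.fmod 9 2 = 1)]
  rw [Bool.eq_iff_iff]
  simp only [Bool.and_eq_true, Bool.not_eq_true', decide_eq_true_eq, decide_eq_false_iff_not]
  rw [Int.fmod_eq_emod, Int.fmod_eq_emod]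
  split_ifs <;> omega

theorem core_any (ds : List Char) (h : ∀ c ∈ ds, PySem.Chars.isdigit c = true)
    (hl : ds.length = 10) :
    pvRestA ds = pvTailB (ds.map (fun c => (PySem.Int.ofChars? [c]).getD 0)) := by
  match ds, hl with
  | [c0,c1,c2,c3,c4,c5,c6,c7,c8,c9], _ => exact core10 c0 c1 c2 c3 c4 c5 c6 c7 c8 c9 h

theorem tailB_drop (l : List Int) (h : l.length = 12) : pvTailB l = pvTailB (l.drop 2) := by
  unfold pvTailB
  rw [PySem.List.slice_from_neg_ofNat l 10 (by omega),
      PySem.List.slice_from_neg_ofNat (l.drop 2) 10 (by omega)]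
  simp [h]

-- ===== VERDICT (by name: the statement is the Claim_ definition above) =====
theorem sweden_personnummer_valid_spec : Claim_equal_sweden_personnummer_valid := by
  intro value _
  unfold Spec_sweden_personnummer_valid sweden_personnummer_valid sweden_personnummer_valid_alt
  have hall : ∀ c ∈ value.toList.filter PySem.Chars.isdigit, PySem.Chars.isdigit c = true :=
    fun c hc => (List.mem_filter.mp hc).2
  set cs := value.toList.filter PySem.Chars.isdigit with hcs
  simp only [List.length_map]
  by_cases h12 : cs.length = 12
  · rw [if_pos h12, if_neg (by simp only [h12]; decide), PySem.List.slice_from cs (by decide),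
        show ((2:Int).toNat) = 2 from rfl,
        core_any _ (fun c hc => hall c (List.mem_of_mem_drop hc))
          (by rw [List.length_drop, h12])]
    rw [List.map_drop]
    exact (tailB_drop _ (by simp only [List.length_map, h12])).symm
  · rw [if_neg h12]
    by_cases h10 : cs.length = 10
    · rw [if_neg (by simp [h10]), if_neg (by simp [h10])]
      exact core_any _ hall h10
    · rw [if_pos (by simp [h10]), if_pos (by simp [h10, h12])]
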